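-- pv_equiv track=rewrite | github.com/zhouchanghai/problem_ans | codility/2018Germanium.py | solution
-- ===== SOURCE A (Python) =====
-- def solution(A, B):
--     n = len(A)
--     uf = UnionFind(n+1)
--     for a, b in zip(A,B):
--         if a>n and b>n: continue
--         if a>n:
--             a = b
--         if b>n:
--             b = a
--         uf.union(a, b)
--     result = n+1
--     for i in range(1,n+1):
--         root = uf.find(i)
--         if uf.circle[root]:
--             continue
--         else:
--             result = min(result, uf.maxVal[root])
--     return result
--
-- class UnionFind:
--     def __init__(self, size):
--         self.parent = [i for i in range(size)]
--         #is there a circle in each group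
--         self.circle = [0]*size
--         #max value in each group
--         self.maxVal = [i for i in range(size)]
--
--     def find(self, val):
--         if self.parent[val] == val:
--             return val
--         self.parent[val] = self.find(self.parent[val])
--         return self.parent[val]
--
--     def union(self, a, b):
--         r1 = self.find(a)
--         r2 = self.find(b)
--         if r1 == r2:
--             self.circle[r1] = 1
--         else:
--             self.parent[r1] = r2
--             self.circle[r2] |= self.circle[r1]
--             self.maxVal[r2] = max(self.maxVal[r1], self.maxVal[r2])
-- ===== SOURCE B (Python) =====
-- def solution(A, B):
--     n = len(A)
--     comp = list(range(n + 1))   # node -> component label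
--     circle = [0] * (n + 1)      # label -> component has a cycle
--     mx = list(range(n + 1))     # label -> max node of the component
--     for a, b in zip(A, B):
--         if a > n and b > n:
--             continue
--         if a > n:
--             a = b
--         if b > n:
--             b = a
--         c1, c2 = comp[a], comp[b]
--         if c1 == c2:
--             circle[c1] = 1
--         else:
--             for k in range(n + 1):
--                 if comp[k] == c1:
--                     comp[k] = c2
--             circle[c2] |= circle[c1]
--             mx[c2] = max(mx[c1], mx[c2])
--     result = n + 1
--     for i in range(1, n + 1):
--         c = comp[i]
--         if not circle[c]:
--             result = min(result, mx[c])
--     return result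
-- ===== Notes on version B (the rewrite author's own statement) =====
-- stated objective: alternative
-- what changed: Replaces the recursive path-compressing union-find (parent forest, find with compression, circle/max stored at roots) by an eager flat node-to-component-label array kept exact by a relabelling scan on each merge, so there is no parent forest, no recursion and no find at all.
import Mathlib
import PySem

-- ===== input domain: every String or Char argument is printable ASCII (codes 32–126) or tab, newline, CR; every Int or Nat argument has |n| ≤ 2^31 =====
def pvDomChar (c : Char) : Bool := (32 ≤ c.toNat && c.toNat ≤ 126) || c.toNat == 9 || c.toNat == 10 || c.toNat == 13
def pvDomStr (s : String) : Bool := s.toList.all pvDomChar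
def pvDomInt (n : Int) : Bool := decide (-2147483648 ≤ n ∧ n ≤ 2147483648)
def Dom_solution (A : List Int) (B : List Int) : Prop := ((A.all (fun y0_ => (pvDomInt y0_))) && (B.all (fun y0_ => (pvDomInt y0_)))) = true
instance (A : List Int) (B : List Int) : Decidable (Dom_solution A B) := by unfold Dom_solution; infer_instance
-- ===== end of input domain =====

-- B replaces A's recursive path-compressing union-find by an eager flat node→component-label
-- map kept exact by a relabelling scan on each merge (objective: alternative decomposition, not faster).

-- ===== PORT A =====
-- `l[i]` / `l[i] = x` on the union-find arrays
def pvGet (l : List Int) (i : Int) : Int := PySem.List.pyGetD l i 0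
def pvSet (l : List Int) (i x : Int) : List Int := PySem.List.pySetD l i x

-- UnionFind.find with path compression; the fuel (called with the array size) is a totality guard only
def ufFind (fuel : Nat) (p : List Int) (v : Int) : List Int × Int :=
  match fuel with
  | 0 => (p, v)
  | fuel + 1 =>
    if pvGet p v = v then (p, v)
    else
      let pr := ufFind fuel p (pvGet p v)
      (pvSet pr.1 v pr.2, pr.2)

-- UnionFind.union on the state (parent, circle, maxVal)
def ufUnion (st : List Int × List Int × List Int) (a b : Int) : List Int × List Int × List Int :=
  let f1 := ufFind st.1.length st.1 a
  let f2 := ufFind f1.1.length f1.1 b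
  if f1.2 = f2.2 then (f2.1, pvSet st.2.1 f1.2 1, st.2.2)
  else (pvSet f2.1 f1.2 f2.2,
        pvSet st.2.1 f2.2 (PySem.Int.bor (pvGet st.2.1 f2.2) (pvGet st.2.1 f1.2)),
        pvSet st.2.2 f2.2 (max (pvGet st.2.2 f1.2) (pvGet st.2.2 f2.2)))

def solution (A : List Int) (B : List Int) : Int :=
  let n : Int := A.length
  let st :=
    (A.zip B).foldl (fun st ab =>
        if ab.1 > n ∧ ab.2 > n then st
        else
          let a := if ab.1 > n then ab.2 else ab.1
          let b := if ab.2 > n then a else ab.2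
          ufUnion st a b)
      (PySem.List.pyRange 0 (n+1) 1, List.replicate (A.length+1) 0, PySem.List.pyRange 0 (n+1) 1)
  let fin :=
    (PySem.List.pyRange 1 (n+1) 1).foldl (fun (acc : List Int × Int) i =>
        let fr := ufFind acc.1.length acc.1 i
        if pvGet st.2.1 fr.2 ≠ 0 then (fr.1, acc.2)
        else (fr.1, min acc.2 (pvGet st.2.2 fr.2)))
      (st.1, n+1)
  fin.2

-- ===== PORT B =====
-- 'for k in range(n+1): if comp[k] == c1: comp[k] = c2'
def relabel (rng : List Int) (c1 c2 : Int) (comp : List Int) : List Int :=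
  rng.foldl (fun cmp k => if pvGet cmp k = c1 then pvSet cmp k c2 else cmp) comp

def solution_alt (A : List Int) (B : List Int) : Int :=
  let n : Int := A.length
  let rng := PySem.List.pyRange 0 (n+1) 1
  let st :=
    (A.zip B).foldl (fun st ab =>
        if ab.1 > n ∧ ab.2 > n then st
        else
          let a := if ab.1 > n then ab.2 else ab.1
          let b := if ab.2 > n then a else ab.2
          let c1 := pvGet st.1 a
          let c2 := pvGet st.1 b
          if c1 = c2 then (st.1, pvSet st.2.1 c1 1, st.2.2)
          else (relabel rng c1 c2 st.1,
                pvSet st.2.1 c2 (PySem.Int.bor (pvGet st.2.1 c2) (pvGet st.2.1 c1)),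
                pvSet st.2.2 c2 (max (pvGet st.2.2 c1) (pvGet st.2.2 c2))))
      (PySem.List.pyRange 0 (n+1) 1, List.replicate (A.length+1) 0, PySem.List.pyRange 0 (n+1) 1)
  (PySem.List.pyRange 1 (n+1) 1).foldl (fun result i =>
      let c := pvGet st.1 i
      if pvGet st.2.1 c = 0 then min result (pvGet st.2.2 c) else result)
    (n+1)

-- ===== PRECONDITION & SPEC =====
-- Pre_ excludes exactly the edge lists on which A raises IndexError (an endpoint below -(n+1));
-- B raises IndexError on the same inputs.
def Pre_solution (A : List Int) (B : List Int) : Prop :=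
  ∀ p ∈ A.zip B, -((A.length : Int) + 1) ≤ p.1 ∧ -((A.length : Int) + 1) ≤ p.2
instance (A : List Int) (B : List Int) : Decidable (Pre_solution A B) := by
  unfold Pre_solution; infer_instance

def pvWitness_solution : List Int × List Int := ([1, 2], [2, 3])

def Spec_solution (A : List Int) (B : List Int) (out : Int) : Prop := out = solution_alt A B
instance (A : List Int) (B : List Int) (out : Int) : Decidable (Spec_solution A B out) := by
  unfold Spec_solution; infer_instance

-- ===== CLAIM (what is proved, stated in full; the proofs are below) =====
def Claim_equal_solution : Prop := ∀ (A : List Int) (B : List Int), Dom_solution A B → Pre_solution A B → Spec_solution A B (solution A B)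

-- ===== LEMMAS AND PROOFS =====

-- node range 0..N
def inR (N : Nat) (v : Int) : Prop := 0 ≤ v ∧ v ≤ (N : Int)

-- k-fold parent application
def iterF (p : List Int) : Nat → Int → Int
  | 0, v => v
  | k + 1, v => iterF p k (pvGet p v)

def RootP (p : List Int) (r : Int) : Prop := pvGet p r = r

def rootp (N : Nat) (p : List Int) (v : Int) : Int := iterF p (N + 1) v

-- well-formed parent array: right length, range-closed, acyclic (certified by a decreasing measure)
def WFp (N : Nat) (p : List Int) : Prop :=
  p.length = N + 1 ∧ (∀ v, inR N v → inR N (pvGet p v)) ∧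
  ∃ d : Int → Nat, ∀ v, inR N v → pvGet p v ≠ v → d (pvGet p v) < d v

theorem length_pvSet (l : List Int) (i x : Int) : (pvSet l i x).length = l.length := by
  simp [pvSet, PySem.List.length_pySetD]

theorem pvGet_pvSet (l : List Int) (i x j : Int) (hi0 : 0 ≤ i) (hi : i < l.length)
    (hj0 : 0 ≤ j) (hj : j < l.length) :
    pvGet (pvSet l i x) j = if j = i then x else pvGet l j := by
  have hi' : i.toNat < l.length := by omega
  have hj' : j.toNat < l.length := by omega
  have hset : pvSet l i x = l.set i.toNat x := PySem.List.pySetD_of_nonneg l x hi0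
  have hlen : j < ((l.set i.toNat x).length : Int) := by simp; omega
  rw [hset]
  unfold pvGet
  rw [PySem.List.pyGetD_eq_getElem (l.set i.toNat x) 0 hj0 hlen,
      PySem.List.pyGetD_eq_getElem l 0 hj0 hj]
  rw [List.getElem_set]
  by_cases h : j = i
  · simp [h]
  · have : i.toNat ≠ j.toNat := by omega
    simp [h, this]

theorem iterF_add (p : List Int) (a b : Nat) (v : Int) :
    iterF p (a + b) v = iterF p b (iterF p a v) := by
  induction a generalizing v with
  | zero => simp [iterF]
  | succ a ih =>
    have : a + 1 + b = (a + b) + 1 := by omega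
    rw [this]
    show iterF p (a + b) (pvGet p v) = _
    rw [ih (pvGet p v)]
    rfl

theorem iterF_succ_right (p : List Int) (k : Nat) (v : Int) :
    iterF p (k + 1) v = pvGet p (iterF p k v) := by
  have := iterF_add p k 1 v
  rw [this]
  rfl

theorem root_stable (p : List Int) (r : Int) (h : RootP p r) (k : Nat) : iterF p k r = r := by
  induction k with
  | zero => rfl
  | succ k ih =>
    show iterF p k (pvGet p r) = r
    rw [h]; exact ih

theorem iter_inR (N : Nat) (p : List Int) (hcl : ∀ v, inR N v → inR N (pvGet p v))
    (v : Int) (hv : inR N v) (k : Nat) : inR N (iterF p k v) := by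
  induction k generalizing v with
  | zero => exact hv
  | succ k ih => exact ih _ (hcl v hv)

theorem wf_reach_root (N : Nat) (p : List Int) (hw : WFp N p) (v : Int) (hv : inR N v) :
    ∃ k ≤ N, RootP p (iterF p k v) := by
  by_contra hcon
  push Not at hcon
  obtain ⟨hlen, hcl, d, hd⟩ := hw
  have hinr : ∀ k, inR N (iterF p k v) := fun k => iter_inR N p hcl v hv k
  have hstep : ∀ k, k ≤ N → d (iterF p (k + 1) v) < d (iterF p k v) := by
    intro k hk
    rw [iterF_succ_right]
    exact hd _ (hinr k) (hcon k hk)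
  have hmono : ∀ i j, i < j → j ≤ N + 1 → d (iterF p j v) < d (iterF p i v) := by
    intro i j hij hj
    induction j with
    | zero => omega
    | succ j ih =>
      rcases Nat.lt_or_ge i j with h | h
      · exact lt_trans (hstep j (by omega)) (ih h (by omega))
      · have hh : i = j := by omega
        subst hh
        exact hstep i (by omega)
  have hmaps : ∀ k : Fin (N + 2), k ∈ (Finset.univ : Finset (Fin (N + 2))) →
      iterF p (k : Nat) v ∈ Finset.Icc (0 : ℤ) (N : ℤ) := by
    intro k _
    have := hinr (k : Nat)
    simp [Finset.mem_Icc]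
    exact this
  have hinj : Set.InjOn (fun k : Fin (N + 2) => iterF p (k : Nat) v)
      ↑(Finset.univ : Finset (Fin (N + 2))) := by
    intro i _ j _ hij
    by_contra hne
    have hne' : (i : Nat) ≠ (j : Nat) := fun h => hne (Fin.ext h)
    have hd_eq : d (iterF p (i : Nat) v) = d (iterF p (j : Nat) v) := by
      simp only at hij
      rw [hij]
    rcases Nat.lt_or_ge (i : Nat) (j : Nat) with h | h
    · have := hmono _ _ h (by omega)
      omega
    · have hlt : (j : Nat) < (i : Nat) := by omega
      have := hmono _ _ hlt (by omega)
      omega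
  have hcard := Finset.card_le_card_of_injOn _ hmaps hinj
  simp [Int.card_Icc] at hcard

theorem rootp_isRoot (N : Nat) (p : List Int) (hw : WFp N p) (v : Int) (hv : inR N v) :
    RootP p (rootp N p v) := by
  obtain ⟨k0, hk0, hroot0⟩ := wf_reach_root N p hw v hv
  have : rootp N p v = iterF p k0 v := by
    unfold rootp
    have h : N + 1 = k0 + (N + 1 - k0) := by omega
    rw [h, iterF_add, root_stable p _ hroot0]
  rw [this]; exact hroot0

theorem rootp_eq_of_reach (N : Nat) (p : List Int) (hw : WFp N p) (v r : Int) (hv : inR N v)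
    (k : Nat) (hk : iterF p k v = r) (hr : RootP p r) : rootp N p v = r := by
  rcases le_total k (N + 1) with h | h
  · have : N + 1 = k + (N + 1 - k) := by omega
    unfold rootp
    rw [this, iterF_add, hk, root_stable p r hr]
  · obtain ⟨k0, hk0, hroot0⟩ := wf_reach_root N p hw v hv
    have hv0 : rootp N p v = iterF p k0 v := by
      unfold rootp
      have : N + 1 = k0 + (N + 1 - k0) := by omega
      rw [this, iterF_add, root_stable p _ hroot0]
    have hksplit : k = (N + 1) + (k - (N + 1)) := by omega
    rw [hksplit, iterF_add] at hk
    have : iterF p (N + 1) v = rootp N p v := rfl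
    rw [this, hv0, root_stable p _ hroot0] at hk
    rw [hv0, ← hk]

theorem rootp_self_of_root (N : Nat) (p : List Int) (r : Int) (h : RootP p r) :
    rootp N p r = r := root_stable p r h _

theorem rootp_step (N : Nat) (p : List Int) (hw : WFp N p) (v : Int) (hv : inR N v) :
    rootp N p (pvGet p v) = rootp N p v := by
  have h1 : rootp N p (pvGet p v) = iterF p (1 + (N + 1)) v := by
    rw [iterF_add]; rfl
  have hr : RootP p (rootp N p (pvGet p v)) := rootp_isRoot N p hw _ (hw.2.1 v hv)
  exact (rootp_eq_of_reach N p hw v _ hv (1 + (N + 1)) h1.symm hr).symm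

theorem rootp_inR (N : Nat) (p : List Int) (hw : WFp N p) (v : Int) (hv : inR N v) :
    inR N (rootp N p v) := iter_inR N p hw.2.1 v hv _

theorem d_iter_le (N : Nat) (p : List Int) (hcl : ∀ v, inR N v → inR N (pvGet p v))
    (d : Int → Nat) (hd : ∀ v, inR N v → pvGet p v ≠ v → d (pvGet p v) < d v) :
    ∀ (k : Nat) (v : Int), inR N v → d (iterF p k v) ≤ d v := by
  intro k
  induction k with
  | zero => intro v _; exact le_refl _
  | succ k ih =>
    intro v hv
    show d (iterF p k (pvGet p v)) ≤ d v
    by_cases hroot : pvGet p v = v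
    · rw [hroot]; exact ih v hv
    · exact le_trans (ih _ (hcl v hv)) (le_of_lt (hd v hv hroot))

theorem d_rootp_lt (N : Nat) (p : List Int) (hcl : ∀ v, inR N v → inR N (pvGet p v))
    (d : Int → Nat) (hd : ∀ v, inR N v → pvGet p v ≠ v → d (pvGet p v) < d v)
    (v : Int) (hv : inR N v) (hne : pvGet p v ≠ v) : d (rootp N p v) < d v := by
  have h1 : d (iterF p N (pvGet p v)) ≤ d (pvGet p v) := d_iter_le N p hcl d hd N _ (hcl v hv)
  have h2 : d (pvGet p v) < d v := hd v hv hne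
  have h3 : rootp N p v = iterF p N (pvGet p v) := by
    unfold rootp
    have h : (N : Nat) + 1 = 1 + N := by omega
    rw [h, iterF_add]
    rfl
  rw [h3]
  omega

theorem root_of_rootp_self (N : Nat) (p : List Int) (hw : WFp N p) (r : Int) (hr : inR N r)
    (h : rootp N p r = r) : RootP p r := by
  by_contra hne
  obtain ⟨hlen, hcl, d, hd⟩ := hw
  have := d_rootp_lt N p hcl d hd r hr hne
  rw [h] at this
  omega

theorem compress (N : Nat) (p : List Int) (v : Int) (hw : WFp N p) (hv : inR N v) :
    WFp N (pvSet p v (rootp N p v)) ∧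
    ∀ u, inR N u → rootp N (pvSet p v (rootp N p v)) u = rootp N p u := by
  have hlen := hw.1
  have hcl := hw.2.1
  obtain ⟨d, hd⟩ := hw.2.2
  have hrroot : RootP p (rootp N p v) := rootp_isRoot N p hw v hv
  have hrin : inR N (rootp N p v) := rootp_inR N p hw v hv
  have hlen' : (pvSet p v (rootp N p v)).length = N + 1 := by rw [length_pvSet, hlen]
  have hget' : ∀ u, inR N u →
      pvGet (pvSet p v (rootp N p v)) u = if u = v then rootp N p v else pvGet p u := by
    intro u hu
    have hv2 := hv.2
    have hu2 := hu.2
    exact pvGet_pvSet p v (rootp N p v) u hv.1 (by omega) hu.1 (by omega)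
  have hwf' : WFp N (pvSet p v (rootp N p v)) := by
    refine ⟨hlen', ?_, ⟨d, ?_⟩⟩
    · intro u hu
      rw [hget' u hu]
      split
      · exact hrin
      · exact hcl u hu
    · intro u hu hne
      rw [hget' u hu] at hne ⊢
      by_cases huv : u = v
      · subst huv
        rw [if_pos rfl] at hne ⊢
        have hpv : pvGet p u ≠ u := by
          intro hh
          exact hne (rootp_self_of_root N p u hh)
        exact d_rootp_lt N p hcl d hd u hu hpv
      · simp only [if_neg huv] at hne ⊢
        exact hd u hu hne
  refine ⟨hwf', ?_⟩
  have hreach : ∀ (m : Nat) (u : Int), inR N u → d u ≤ m →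
      ∃ k, iterF (pvSet p v (rootp N p v)) k u = rootp N p u := by
    intro m
    induction m with
    | zero =>
      intro u hu hm
      by_cases hroot : pvGet p u = u
      · exact ⟨0, (rootp_self_of_root N p u hroot).symm⟩
      · by_cases huv : u = v
        · subst huv
          refine ⟨1, ?_⟩
          show pvGet (pvSet p u (rootp N p u)) u = rootp N p u
          rw [hget' u hu]
          simp
        · exfalso
          have := hd u hu hroot
          omega
    | succ m ih =>
      intro u hu hm
      by_cases hroot : pvGet p u = u
      · exact ⟨0, (rootp_self_of_root N p u hroot).symm⟩
      · by_cases huv : u = v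
        · subst huv
          refine ⟨1, ?_⟩
          show pvGet (pvSet p u (rootp N p u)) u = rootp N p u
          rw [hget' u hu]
          simp
        · have hdw : d (pvGet p u) < d u := hd u hu hroot
          obtain ⟨k, hk⟩ := ih (pvGet p u) (hcl u hu) (by omega)
          refine ⟨k + 1, ?_⟩
          show iterF (pvSet p v (rootp N p v)) k (pvGet (pvSet p v (rootp N p v)) u) = rootp N p u
          rw [hget' u hu, if_neg huv, hk, rootp_step N p hw u hu]
  intro u hu
  obtain ⟨k, hk⟩ := hreach (d u) u hu (le_refl _)
  apply rootp_eq_of_reach N _ hwf' u (rootp N p u) hu k hk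
  -- the old root is still a root
  show pvGet (pvSet p v (rootp N p v)) (rootp N p u) = rootp N p u
  have huroot : RootP p (rootp N p u) := rootp_isRoot N p hw u hu
  rw [hget' (rootp N p u) (rootp_inR N p hw u hu)]
  by_cases hrv : rootp N p u = v
  · rw [if_pos hrv, hrv]
    rw [hrv] at huroot
    exact rootp_self_of_root N p v huroot
  · rw [if_neg hrv]
    exact huroot

theorem link (N : Nat) (p : List Int) (r1 r2 : Int) (hw : WFp N p)
    (h1 : inR N r1) (h2 : inR N r2) (hr1 : RootP p r1) (hr2 : RootP p r2) (hne : r1 ≠ r2) :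
    WFp N (pvSet p r1 r2) ∧
    ∀ u, inR N u → rootp N (pvSet p r1 r2) u =
      if rootp N p u = r1 then r2 else rootp N p u := by
  have hlen := hw.1
  have hcl := hw.2.1
  obtain ⟨d, hd⟩ := hw.2.2
  have hlen' : (pvSet p r1 r2).length = N + 1 := by rw [length_pvSet, hlen]
  have hget' : ∀ u, inR N u → pvGet (pvSet p r1 r2) u = if u = r1 then r2 else pvGet p u := by
    intro u hu
    have h12 := h1.2
    have hu2 := hu.2
    exact pvGet_pvSet p r1 r2 u h1.1 (by omega) hu.1 (by omega)
  have hroot1 : rootp N p r1 = r1 := rootp_self_of_root N p r1 hr1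
  have hroot2 : rootp N p r2 = r2 := rootp_self_of_root N p r2 hr2
  have hwf' : WFp N (pvSet p r1 r2) := by
    refine ⟨hlen', ?_, ⟨fun u => if rootp N p u = r1 then d u + d r2 + 1 else d u, ?_⟩⟩
    · intro u hu
      rw [hget' u hu]
      split
      · exact h2
      · exact hcl u hu
    · intro u hu hne
      beta_reduce
      rw [hget' u hu] at hne ⊢
      by_cases hur : u = r1
      · subst hur
        rw [if_pos rfl] at hne ⊢
        rw [hroot2, hroot1, if_neg hne, if_pos rfl]
        omega
      · simp only [if_neg hur] at hne ⊢
        have hstep := rootp_step N p hw u hu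
        have hdd := hd u hu hne
        rw [hstep]
        by_cases hru : rootp N p u = r1
        · simp only [if_pos hru]; omega
        · simp only [if_neg hru]; omega
  refine ⟨hwf', ?_⟩
  have hreach : ∀ (m : Nat) (u : Int), inR N u → d u ≤ m →
      ∃ k, iterF (pvSet p r1 r2) k u = (if rootp N p u = r1 then r2 else rootp N p u) := by
    intro m
    induction m with
    | zero =>
      intro u hu hm
      by_cases hroot : pvGet p u = u
      · have hru : rootp N p u = u := rootp_self_of_root N p u hroot
        rw [hru]
        by_cases hur : u = r1
        · subst hur
          refine ⟨1, ?_⟩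
          rw [if_pos rfl]
          show pvGet (pvSet p u r2) u = r2
          rw [hget' u hu]
          simp
        · exact ⟨0, by simp [if_neg hur, iterF]⟩
      · exfalso
        have := hd u hu hroot
        omega
    | succ m ih =>
      intro u hu hm
      by_cases hroot : pvGet p u = u
      · have hru : rootp N p u = u := rootp_self_of_root N p u hroot
        rw [hru]
        by_cases hur : u = r1
        · subst hur
          refine ⟨1, ?_⟩
          rw [if_pos rfl]
          show pvGet (pvSet p u r2) u = r2
          rw [hget' u hu]
          simp
        · exact ⟨0, by simp [if_neg hur, iterF]⟩
      · have hur : u ≠ r1 := by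
          intro hh
          subst hh
          exact hroot hr1
        have hdw : d (pvGet p u) < d u := hd u hu hroot
        obtain ⟨k, hk⟩ := ih (pvGet p u) (hcl u hu) (by omega)
        refine ⟨k + 1, ?_⟩
        show iterF (pvSet p r1 r2) k (pvGet (pvSet p r1 r2) u) =
          (if rootp N p u = r1 then r2 else rootp N p u)
        rw [hget' u hu, if_neg hur, hk, rootp_step N p hw u hu]
  intro u hu
  obtain ⟨k, hk⟩ := hreach (d u) u hu (le_refl _)
  apply rootp_eq_of_reach N _ hwf' u _ hu k hk
  by_cases hru : rootp N p u = r1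
  · simp only [if_pos hru]
    show pvGet (pvSet p r1 r2) r2 = r2
    rw [hget' r2 h2, if_neg (fun hh => hne hh.symm)]
    exact hr2
  · simp only [if_neg hru]
    show pvGet (pvSet p r1 r2) (rootp N p u) = rootp N p u
    rw [hget' (rootp N p u) (rootp_inR N p hw u hu), if_neg hru]
    exact rootp_isRoot N p hw u hu

theorem find_spec (N : Nat) : ∀ (fuel : Nat) (p : List Int) (v : Int), WFp N p → inR N v →
    (∃ k, k < fuel ∧ RootP p (iterF p k v)) →
    (ufFind fuel p v).2 = rootp N p v ∧ WFp N (ufFind fuel p v).1 ∧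
    (∀ u, inR N u → rootp N (ufFind fuel p v).1 u = rootp N p u) := by
  intro fuel
  induction fuel with
  | zero =>
    intro p v hw hv h
    obtain ⟨k, hk, _⟩ := h
    omega
  | succ fuel ih =>
    intro p v hw hv h
    obtain ⟨k, hk, hroot⟩ := h
    by_cases hr : pvGet p v = v
    · have heq : ufFind (fuel + 1) p v = (p, v) := by
        simp [ufFind, hr]
      rw [heq]
      exact ⟨(rootp_self_of_root N p v hr).symm, hw, fun u _ => rfl⟩
    · have hk0 : k ≠ 0 := by
        intro hh
        subst hh
        exact hr hroot
      obtain ⟨k', rfl⟩ : ∃ k', k = k' + 1 := ⟨k - 1, by omega⟩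
      have hroot' : RootP p (iterF p k' (pvGet p v)) := hroot
      have hpvin : inR N (pvGet p v) := hw.2.1 v hv
      have IH := ih p (pvGet p v) hw hpvin ⟨k', by omega, hroot'⟩
      have heq : ufFind (fuel + 1) p v =
          (pvSet (ufFind fuel p (pvGet p v)).1 v (ufFind fuel p (pvGet p v)).2,
           (ufFind fuel p (pvGet p v)).2) := by
        simp [ufFind, hr]
      obtain ⟨hval, hwf1, hpres1⟩ := IH
      have hstep := rootp_step N p hw v hv
      -- value returned is the root of v
      have hvval : (ufFind fuel p (pvGet p v)).2 = rootp N p v := by rw [hval, hstep]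
      -- the write is exactly the compression write
      have hr1v : rootp N ((ufFind fuel p (pvGet p v)).1) v = rootp N p v := hpres1 v hv
      have hcomp := compress N ((ufFind fuel p (pvGet p v)).1) v hwf1 hv
      rw [hr1v] at hcomp
      rw [heq]
      refine ⟨?_, ?_, ?_⟩
      · rw [hvval]
      · show WFp N (pvSet (ufFind fuel p (pvGet p v)).1 v (ufFind fuel p (pvGet p v)).2)
        rw [hvval]
        exact hcomp.1
      · intro u hu
        show rootp N (pvSet (ufFind fuel p (pvGet p v)).1 v (ufFind fuel p (pvGet p v)).2) u =
          rootp N p u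
        rw [hvval]
        rw [hcomp.2 u hu]
        exact hpres1 u hu

theorem union_spec (N : Nat) (p c m : List Int) (a b : Int) (hw : WFp N p)
    (hc : c.length = N + 1) (hm : m.length = N + 1) (ha : inR N a) (hb : inR N b) :
    WFp N (ufUnion (p, c, m) a b).1 ∧
    (ufUnion (p, c, m) a b).2.1.length = N + 1 ∧
    (ufUnion (p, c, m) a b).2.2.length = N + 1 ∧
    (if rootp N p a = rootp N p b then
      (∀ u, inR N u → rootp N (ufUnion (p, c, m) a b).1 u = rootp N p u) ∧
      (ufUnion (p, c, m) a b).2.1 = pvSet c (rootp N p a) 1 ∧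
      (ufUnion (p, c, m) a b).2.2 = m
    else
      (∀ u, inR N u → rootp N (ufUnion (p, c, m) a b).1 u =
        if rootp N p u = rootp N p a then rootp N p b else rootp N p u) ∧
      (ufUnion (p, c, m) a b).2.1 =
        pvSet c (rootp N p b) (PySem.Int.bor (pvGet c (rootp N p b)) (pvGet c (rootp N p a))) ∧
      (ufUnion (p, c, m) a b).2.2 =
        pvSet m (rootp N p b) (max (pvGet m (rootp N p a)) (pvGet m (rootp N p b)))) := by
  have hflen : p.length = N + 1 := hw.1
  obtain ⟨k1, hk1, hroot1⟩ := wf_reach_root N p hw a ha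
  have spec1 := find_spec N p.length p a hw ha ⟨k1, by omega, hroot1⟩
  set f1 := ufFind p.length p a with hf1
  obtain ⟨hval1, hwf1, hpres1⟩ := spec1
  obtain ⟨k2, hk2, hroot2⟩ := wf_reach_root N f1.1 hwf1 b hb
  have hlen1 : f1.1.length = N + 1 := hwf1.1
  have spec2 := find_spec N f1.1.length f1.1 b hwf1 hb ⟨k2, by omega, hroot2⟩
  set f2 := ufFind f1.1.length f1.1 b with hf2
  obtain ⟨hval2, hwf2, hpres2⟩ := spec2
  have hval2' : f2.2 = rootp N p b := by rw [hval2, hpres1 b hb]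
  have hpres2' : ∀ u, inR N u → rootp N f2.1 u = rootp N p u := fun u hu => by
    rw [hpres2 u hu, hpres1 u hu]
  have hU : ufUnion (p, c, m) a b =
      (if f1.2 = f2.2 then (f2.1, pvSet c f1.2 1, m)
       else (pvSet f2.1 f1.2 f2.2,
             pvSet c f2.2 (PySem.Int.bor (pvGet c f2.2) (pvGet c f1.2)),
             pvSet m f2.2 (max (pvGet m f1.2) (pvGet m f2.2)))) := rfl
  rw [hU, hval1, hval2']
  have hain : inR N (rootp N p a) := rootp_inR N p hw a ha
  have hbin : inR N (rootp N p b) := rootp_inR N p hw b hb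
  by_cases hrr : rootp N p a = rootp N p b
  · simp only [if_pos hrr]
    refine ⟨hwf2, ?_, hm, hpres2', trivial, trivial⟩
    rw [length_pvSet, hc]
  · simp only [if_neg hrr]
    have hra : RootP f2.1 (rootp N p a) := by
      apply root_of_rootp_self N f2.1 hwf2 _ hain
      rw [hpres2' _ hain]
      exact rootp_self_of_root N p _ (rootp_isRoot N p hw a ha)
    have hrb : RootP f2.1 (rootp N p b) := by
      apply root_of_rootp_self N f2.1 hwf2 _ hbin
      rw [hpres2' _ hbin]
      exact rootp_self_of_root N p _ (rootp_isRoot N p hw b hb)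
    have hlink := link N f2.1 (rootp N p a) (rootp N p b) hwf2 hain hbin hra hrb hrr
    refine ⟨hlink.1, ?_, ?_, ?_, trivial, trivial⟩
    · rw [length_pvSet, hc]
    · rw [length_pvSet, hm]
    · intro u hu
      rw [hlink.2 u hu, hpres2' u hu]

theorem length_relabel (c1 c2 : Int) : ∀ (l : List Int) (cmp : List Int),
    (relabel l c1 c2 cmp).length = cmp.length := by
  intro l
  induction l with
  | nil => intro cmp; rfl
  | cons k t ih =>
    intro cmp
    have hstep : relabel (k :: t) c1 c2 cmp =
        relabel t c1 c2 (if pvGet cmp k = c1 then pvSet cmp k c2 else cmp) := rfl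
    rw [hstep, ih]
    split
    · exact length_pvSet cmp k c2
    · rfl

theorem relabel_get (c1 c2 : Int) (h : c1 ≠ c2) : ∀ (l : List Int) (cmp : List Int),
    (∀ k ∈ l, 0 ≤ k ∧ k < (cmp.length : Int)) →
    ∀ v, 0 ≤ v → v < (cmp.length : Int) →
    pvGet (relabel l c1 c2 cmp) v = if v ∈ l ∧ pvGet cmp v = c1 then c2 else pvGet cmp v := by
  intro l
  induction l with
  | nil => intro cmp _ v _ _; simp [relabel]
  | cons k t ih =>
    intro cmp hbnd v hv1 hv2
    have hk := hbnd k (List.mem_cons_self)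
    have hstep : relabel (k :: t) c1 c2 cmp =
        relabel t c1 c2 (if pvGet cmp k = c1 then pvSet cmp k c2 else cmp) := rfl
    have hlen' : (if pvGet cmp k = c1 then pvSet cmp k c2 else cmp).length = cmp.length := by
      split
      · exact length_pvSet cmp k c2
      · rfl
    rw [hstep, ih _ (by rw [hlen']; exact fun x hx => hbnd x (List.mem_cons_of_mem _ hx))
        v hv1 (by rw [hlen']; exact hv2)]
    by_cases hkc : pvGet cmp k = c1
    · simp only [if_pos hkc]
      rw [pvGet_pvSet cmp k c2 v hk.1 hk.2 hv1 hv2]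
      by_cases hvk : v = k
      · subst hvk
        have h2 : ¬ c2 = c1 := fun hh => h hh.symm
        simp [h2, hkc]
      · simp only [if_neg hvk]
        simp [List.mem_cons, hvk]
    · simp only [if_neg hkc]
      by_cases hvk : v = k
      · subst hvk
        simp [List.mem_cons, hkc]
      · simp [List.mem_cons, hvk]

-- Python's negative-index wraparound on reads, writes, and a write of the value already there
theorem pvGet_neg (l : List Int) (v : Int) (h1 : -((l.length : Int)) ≤ v) (h2 : v < 0) :
    pvGet l v = pvGet l (v + (l.length : Int)) := by
  have hk1 : 0 < (-v).toNat := by omega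
  have hk2 : (-v).toNat ≤ l.length := by omega
  have hv : v = -(((-v).toNat : Int)) := by omega
  unfold pvGet
  rw [hv]
  rw [PySem.List.pyGetD_neg_natCast l ((-v).toNat) 0 hk1 hk2]
  rw [PySem.List.pyGetD_eq_getElem l 0 (by omega) (by omega)]
  congr 1
  omega

theorem pvSet_neg (l : List Int) (v x : Int) (h1 : -((l.length : Int)) ≤ v) (h2 : v < 0) :
    pvSet l v x = pvSet l (v + (l.length : Int)) x := by
  have key : PySem.List.pySetD l v x = l.set (v + (l.length : Int)).toNat x := by
    simp [PySem.List.pySetD, PySem.List.pySet?, PySem.List.pyIdx?]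
    rw [if_pos h1]
    have he : l.length - (-v).toNat = (v + (l.length : Int)).toNat := by omega
    rw [he]
    rw [if_neg (by omega : ¬ 0 ≤ v)]
    rfl
  unfold pvSet
  rw [key, PySem.List.pySetD_of_nonneg l x (by omega)]

theorem pvSet_self (l : List Int) (i x : Int) (h1 : 0 ≤ i) (h2 : i < (l.length : Int))
    (hg : pvGet l i = x) : pvSet l i x = l := by
  unfold pvSet
  rw [PySem.List.pySetD_of_nonneg l x h1]
  apply List.ext_getElem (by simp)
  intro n hn1 hn2
  rw [List.getElem_set]
  split
  · subst hg
    unfold pvGet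
    rw [PySem.List.pyGetD_eq_getElem l 0 h1 h2]
    congr 1
  · rfl

-- normalisation of a possibly negative node label to its slot 0..N
def wrapI (N : Nat) (v : Int) : Int := if v < 0 then v + ((N : Int) + 1) else v

theorem wrapI_inR (N : Nat) (v : Int) (h1 : -((N : Int) + 1) ≤ v) (h2 : v ≤ (N : Int)) :
    inR N (wrapI N v) := by
  unfold wrapI inR
  split <;> omega

theorem pvGet_wrap (N : Nat) (l : List Int) (hlen : l.length = N + 1) (v : Int)
    (h1 : -((N : Int) + 1) ≤ v) : pvGet l v = pvGet l (wrapI N v) := by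
  have hlenI : ((l.length : Int)) = (N : Int) + 1 := by rw [hlen]; push_cast; ring
  unfold wrapI
  split_ifs with h
  · rw [pvGet_neg l v (by omega) h, hlenI]
  · rfl

-- find entered at a negative label behaves as find at its wrapped slot
theorem find_wrap (N : Nat) (p : List Int) (v : Int) (hw : WFp N p)
    (h1 : -((N : Int) + 1) ≤ v) (h2 : v < 0) :
    ufFind (N + 1) p v = ufFind (N + 1) p (v + ((N : Int) + 1)) := by
  have hlen := hw.1
  have hcl := hw.2.1
  have hlenI : ((p.length : Int)) = (N : Int) + 1 := by rw [hlen]; push_cast; ring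
  set w := v + ((N : Int) + 1) with hwdef
  have hwin : inR N w := by unfold inR; omega
  have hread : pvGet p v = pvGet p w := by
    rw [pvGet_neg p v (by omega) h2, hlenI]
  have hwv : pvGet p w ≠ v := by
    have h0 := (hcl w hwin).1
    omega
  have hLHS : ufFind (N + 1) p v =
      (pvSet (ufFind N p (pvGet p w)).1 v (ufFind N p (pvGet p w)).2,
        (ufFind N p (pvGet p w)).2) := by
    have hne : ¬ pvGet p v = v := by rw [hread]; exact hwv
    show (if pvGet p v = v then (p, v)
      else (pvSet (ufFind N p (pvGet p v)).1 v (ufFind N p (pvGet p v)).2,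
        (ufFind N p (pvGet p v)).2)) = _
    rw [if_neg hne, hread]
  by_cases hroot : pvGet p w = w
  · have hinner : ufFind N p (pvGet p w) = (p, w) := by
      rw [hroot]
      cases N with
      | zero => rfl
      | succ m =>
        show (if pvGet p w = w then (p, w)
          else (pvSet (ufFind m p (pvGet p w)).1 w (ufFind m p (pvGet p w)).2,
            (ufFind m p (pvGet p w)).2)) = _
        rw [if_pos hroot]
    have hRHS : ufFind (N + 1) p w = (p, w) := by
      show (if pvGet p w = w then (p, w)
        else (pvSet (ufFind N p (pvGet p w)).1 w (ufFind N p (pvGet p w)).2,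
          (ufFind N p (pvGet p w)).2)) = _
      rw [if_pos hroot]
    rw [hLHS, hinner, hRHS]
    have hset : pvSet p v w = p := by
      rw [pvSet_neg p v w (by omega) h2, hlenI, ← hwdef]
      exact pvSet_self p w w hwin.1 (by omega) hroot
    rw [hset]
  · have hN : 1 ≤ N := by
      by_contra hh
      have hx := hcl w hwin
      have hx1 := hx.1
      have hx2 := hx.2
      have hw1 := hwin.1
      have hw2 := hwin.2
      exact hroot (by omega)
    obtain ⟨k0, hk0, hroot0⟩ := wf_reach_root N p hw w hwin
    have hk0ne : k0 ≠ 0 := by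
      intro hh
      subst hh
      exact hroot hroot0
    have hspec := find_spec N N p (pvGet p w) hw (hcl w hwin)
      ⟨k0 - 1, by omega, by
        have e : k0 = (k0 - 1) + 1 := by omega
        rw [e] at hroot0
        exact hroot0⟩
    have hlen1 : (ufFind N p (pvGet p w)).1.length = N + 1 := hspec.2.1.1
    have hlenI1 : (((ufFind N p (pvGet p w)).1.length : Int)) = (N : Int) + 1 := by
      rw [hlen1]; push_cast; ring
    have hRHS : ufFind (N + 1) p w =
        (pvSet (ufFind N p (pvGet p w)).1 w (ufFind N p (pvGet p w)).2,
          (ufFind N p (pvGet p w)).2) := by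
      show (if pvGet p w = w then (p, w)
        else (pvSet (ufFind N p (pvGet p w)).1 w (ufFind N p (pvGet p w)).2,
          (ufFind N p (pvGet p w)).2)) = _
      rw [if_neg hroot]
    rw [hLHS, hRHS]
    rw [pvSet_neg _ v _ (by omega) h2, hlenI1, ← hwdef]

-- union at possibly negative labels equals union at the wrapped slots
theorem ufUnion_wrap (N : Nat) (p c m : List Int) (a b : Int) (hw : WFp N p)
    (ha1 : -((N : Int) + 1) ≤ a) (ha2 : a ≤ (N : Int))
    (hb1 : -((N : Int) + 1) ≤ b) :
    ufUnion (p, c, m) a b = ufUnion (p, c, m) (wrapI N a) (wrapI N b) := by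
  have hlen := hw.1
  have hf1 : ufFind p.length p a = ufFind p.length p (wrapI N a) := by
    by_cases h : a < 0
    · have hwa' : wrapI N a = a + ((N : Int) + 1) := by unfold wrapI; rw [if_pos h]
      rw [hwa', hlen]
      exact find_wrap N p a hw ha1 h
    · have hwa' : wrapI N a = a := by unfold wrapI; rw [if_neg h]
      rw [hwa']
  have hwa : inR N (wrapI N a) := wrapI_inR N a ha1 ha2
  obtain ⟨k1, hk1, hr1⟩ := wf_reach_root N p hw _ hwa
  have hspec1 := find_spec N p.length p (wrapI N a) hw hwa ⟨k1, by omega, hr1⟩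
  have hwf1 : WFp N (ufFind p.length p (wrapI N a)).1 := hspec1.2.1
  have hlen1 : (ufFind p.length p (wrapI N a)).1.length = N + 1 := hwf1.1
  have hf2 : ufFind (ufFind p.length p (wrapI N a)).1.length (ufFind p.length p (wrapI N a)).1 b =
      ufFind (ufFind p.length p (wrapI N a)).1.length (ufFind p.length p (wrapI N a)).1
        (wrapI N b) := by
    by_cases h : b < 0
    · have hwb' : wrapI N b = b + ((N : Int) + 1) := by unfold wrapI; rw [if_pos h]
      rw [hwb', hlen1]
      exact find_wrap N _ b hwf1 hb1 h
    · have hwb' : wrapI N b = b := by unfold wrapI; rw [if_neg h]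
      rw [hwb']
  unfold ufUnion
  dsimp only
  rw [hf1, hf2]

-- the two fold states agree step by step
theorem foldl_rel {α β γ : Type} (P : α → β → Prop) (Q : γ → Prop) (f : α → γ → α)
    (g : β → γ → β) (h : ∀ x a b, Q x → P a b → P (f a x) (g b x)) :
    ∀ (l : List γ) (a : α) (b : β), (∀ x ∈ l, Q x) → P a b → P (l.foldl f a) (l.foldl g b) := by
  intro l
  induction l with
  | nil => intro a b _ hp; exact hp
  | cons x t ih =>
    intro a b hq hp
    exact ih _ _ (fun y hy => hq y (List.mem_cons_of_mem _ hy)) (h x a b (hq x (List.mem_cons_self)) hp)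

-- invariant linking A's union-find state and B's labelling state
def StInv (N : Nat) (stA : List Int × List Int × List Int)
    (stB : List Int × List Int × List Int) : Prop :=
  WFp N stA.1 ∧ stA.2.1.length = N + 1 ∧ stA.2.2.length = N + 1 ∧
  stB.1.length = N + 1 ∧ stB.2.1.length = N + 1 ∧ stB.2.2.length = N + 1 ∧
  ∀ v, inR N v →
    pvGet stB.1 v = rootp N stA.1 v ∧
    pvGet stB.2.1 v = pvGet stA.2.1 v ∧
    pvGet stB.2.2 v = pvGet stA.2.2 v

theorem init_inv (N : Nat) :
    StInv N
      (PySem.List.pyRange 0 ((N : Int) + 1) 1, List.replicate (N + 1) 0,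
        PySem.List.pyRange 0 ((N : Int) + 1) 1)
      (PySem.List.pyRange 0 ((N : Int) + 1) 1, List.replicate (N + 1) 0,
        PySem.List.pyRange 0 ((N : Int) + 1) 1) := by
  have hlen0 : (PySem.List.pyRange 0 ((N : Int) + 1) 1).length = N + 1 := by
    rw [PySem.List.length_pyRange_one]
    omega
  have hget0 : ∀ v, inR N v → pvGet (PySem.List.pyRange 0 ((N : Int) + 1) 1) v = v := by
    intro v hv
    have hv1 := hv.1
    have hv2 := hv.2
    unfold pvGet
    rw [PySem.List.pyGetD_eq_getElem _ _ hv1 (by rw [hlen0]; omega)]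
    rw [PySem.List.getElem_pyRange_one]
    omega
  have hwf0 : WFp N (PySem.List.pyRange 0 ((N : Int) + 1) 1) := by
    refine ⟨hlen0, ?_, ⟨fun _ => 0, ?_⟩⟩
    · intro v hv
      rw [hget0 v hv]
      exact hv
    · intro v hv hne
      exact absurd (hget0 v hv) hne
  refine ⟨hwf0, by simp, hlen0, hlen0, by simp, hlen0, ?_⟩
  intro v hv
  exact ⟨by rw [hget0 v hv, rootp_self_of_root N _ v (hget0 v hv)], rfl, rfl⟩

theorem step_inv (N : Nat) (x : Int × Int)
    (stA stB : List Int × List Int × List Int)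
    (hx : -((N : Int) + 1) ≤ x.1 ∧ -((N : Int) + 1) ≤ x.2) (hinv : StInv N stA stB) :
    StInv N
      (if x.1 > (N : Int) ∧ x.2 > (N : Int) then stA
       else
         ufUnion stA (if x.1 > (N : Int) then x.2 else x.1)
           (if x.2 > (N : Int) then (if x.1 > (N : Int) then x.2 else x.1) else x.2))
      (if x.1 > (N : Int) ∧ x.2 > (N : Int) then stB
       else
         if pvGet stB.1 (if x.1 > (N : Int) then x.2 else x.1) =
            pvGet stB.1 (if x.2 > (N : Int) then (if x.1 > (N : Int) then x.2 else x.1) else x.2)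
         then
           (stB.1,
            pvSet stB.2.1 (pvGet stB.1 (if x.1 > (N : Int) then x.2 else x.1)) 1,
            stB.2.2)
         else
           (relabel (PySem.List.pyRange 0 ((N : Int) + 1) 1)
              (pvGet stB.1 (if x.1 > (N : Int) then x.2 else x.1))
              (pvGet stB.1 (if x.2 > (N : Int) then (if x.1 > (N : Int) then x.2 else x.1) else x.2))
              stB.1,
            pvSet stB.2.1
              (pvGet stB.1 (if x.2 > (N : Int) then (if x.1 > (N : Int) then x.2 else x.1) else x.2))
              (PySem.Int.bor
                (pvGet stB.2.1
                  (pvGet stB.1 (if x.2 > (N : Int) then (if x.1 > (N : Int) then x.2 else x.1) else x.2)))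
                (pvGet stB.2.1 (pvGet stB.1 (if x.1 > (N : Int) then x.2 else x.1)))),
            pvSet stB.2.2
              (pvGet stB.1 (if x.2 > (N : Int) then (if x.1 > (N : Int) then x.2 else x.1) else x.2))
              (max (pvGet stB.2.2 (pvGet stB.1 (if x.1 > (N : Int) then x.2 else x.1)))
                (pvGet stB.2.2
                  (pvGet stB.1
                    (if x.2 > (N : Int) then (if x.1 > (N : Int) then x.2 else x.1) else x.2)))))) := by
  by_cases hg : x.1 > (N : Int) ∧ x.2 > (N : Int)
  · rw [if_pos hg, if_pos hg]
    exact hinv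
  · rw [if_neg hg, if_neg hg]
    obtain ⟨hx1, hx2⟩ := hx
    rcases stA with ⟨p, cc, mm⟩
    rcases stB with ⟨dc, dcir, dmx⟩
    obtain ⟨hwf, hclen, hmlen, hdclen, hdcirlen, hdmxlen, hptw⟩ := hinv
    dsimp only at hwf hclen hmlen hdclen hdcirlen hdmxlen hptw ⊢
    set a := if x.1 > (N : Int) then x.2 else x.1 with ha'
    set b := if x.2 > (N : Int) then a else x.2 with hb'
    have hng : ¬ (x.1 > (N : Int)) ∨ ¬ (x.2 > (N : Int)) := not_and_or.mp hg
    have ha1 : -((N : Int) + 1) ≤ a := by rw [ha']; split_ifs <;> omega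
    have ha2 : a ≤ (N : Int) := by
      rw [ha']
      rcases hng with h | h <;> split_ifs <;> omega
    have hb1 : -((N : Int) + 1) ≤ b := by rw [hb']; split_ifs <;> omega
    have hb2 : b ≤ (N : Int) := by rw [hb']; split_ifs <;> omega
    have hwa : inR N (wrapI N a) := wrapI_inR N a ha1 ha2
    have hwb : inR N (wrapI N b) := wrapI_inR N b hb1 hb2
    rw [ufUnion_wrap N p cc mm a b hwf ha1 ha2 hb1]
    rw [pvGet_wrap N dc hdclen a ha1, pvGet_wrap N dc hdclen b hb1]
    have hc1 : pvGet dc (wrapI N a) = rootp N p (wrapI N a) := (hptw _ hwa).1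
    have hc2 : pvGet dc (wrapI N b) = rootp N p (wrapI N b) := (hptw _ hwb).1
    have hr1in : inR N (rootp N p (wrapI N a)) := rootp_inR N p hwf _ hwa
    have hr2in : inR N (rootp N p (wrapI N b)) := rootp_inR N p hwf _ hwb
    have hspec := union_spec N p cc mm (wrapI N a) (wrapI N b) hwf hclen hmlen hwa hwb
    rw [hc1, hc2]
    by_cases hrr : rootp N p (wrapI N a) = rootp N p (wrapI N b)
    · rw [if_pos hrr] at hspec ⊢
      obtain ⟨hwfU, hclenU, hmlenU, hpresU, hcU, hmU⟩ := hspec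
      refine ⟨hwfU, hclenU, hmlenU, hdclen, by rw [length_pvSet]; exact hdcirlen, hdmxlen, ?_⟩
      intro v hv
      have hv1 := hv.1
      have hv2 := hv.2
      refine ⟨?_, ?_, ?_⟩
      · rw [(hptw v hv).1, hpresU v hv]
      · rw [hcU]
        rw [pvGet_pvSet cc (rootp N p (wrapI N a)) 1 v hr1in.1
              (by have := hr1in.2; omega) hv1 (by omega)]
        rw [pvGet_pvSet dcir (rootp N p (wrapI N a)) 1 v hr1in.1
              (by have := hr1in.2; omega) hv1 (by omega)]
        rw [(hptw v hv).2.1]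
      · rw [hmU]
        exact (hptw v hv).2.2
    · rw [if_neg hrr] at hspec ⊢
      obtain ⟨hwfU, hclenU, hmlenU, hpresU, hcU, hmU⟩ := hspec
      have hcv1 : pvGet dcir (rootp N p (wrapI N a)) = pvGet cc (rootp N p (wrapI N a)) :=
        (hptw _ hr1in).2.1
      have hcv2 : pvGet dcir (rootp N p (wrapI N b)) = pvGet cc (rootp N p (wrapI N b)) :=
        (hptw _ hr2in).2.1
      have hmv1 : pvGet dmx (rootp N p (wrapI N a)) = pvGet mm (rootp N p (wrapI N a)) :=
        (hptw _ hr1in).2.2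
      have hmv2 : pvGet dmx (rootp N p (wrapI N b)) = pvGet mm (rootp N p (wrapI N b)) :=
        (hptw _ hr2in).2.2
      refine ⟨hwfU, hclenU, hmlenU,
        by rw [length_relabel]; exact hdclen,
        by rw [length_pvSet]; exact hdcirlen,
        by rw [length_pvSet]; exact hdmxlen, ?_⟩
      intro v hv
      have hv1 := hv.1
      have hv2 := hv.2
      refine ⟨?_, ?_, ?_⟩
      · rw [relabel_get _ _ hrr _ dc ?_ v hv1 (by omega)]
        · have hvmem : v ∈ PySem.List.pyRange 0 ((N : Int) + 1) 1 := by
            rw [PySem.List.mem_pyRange_one]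
            exact ⟨hv1, by omega⟩
          rw [(hptw v hv).1, hpresU v hv]
          simp [hvmem]
        · intro k hk
          rw [PySem.List.mem_pyRange_one] at hk
          exact ⟨hk.1, by omega⟩
      · rw [hcU, hcv1, hcv2]
        rw [pvGet_pvSet cc (rootp N p (wrapI N b)) _ v hr2in.1
              (by have := hr2in.2; omega) hv1 (by omega)]
        rw [pvGet_pvSet dcir (rootp N p (wrapI N b)) _ v hr2in.1
              (by have := hr2in.2; omega) hv1 (by omega)]
        rw [(hptw v hv).2.1]
      · rw [hmU, hmv1, hmv2]
        rw [pvGet_pvSet mm (rootp N p (wrapI N b)) _ v hr2in.1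
              (by have := hr2in.2; omega) hv1 (by omega)]
        rw [pvGet_pvSet dmx (rootp N p (wrapI N b)) _ v hr2in.1
              (by have := hr2in.2; omega) hv1 (by omega)]
        rw [(hptw v hv).2.2]

theorem edges_inv (N : Nat) (l : List (Int × Int))
    (hl : ∀ x ∈ l, -((N : Int) + 1) ≤ x.1 ∧ -((N : Int) + 1) ≤ x.2)
    (stA stB : List Int × List Int × List Int)
    (h0 : StInv N stA stB) :
    StInv N
      (l.foldl (fun st ab =>
          if ab.1 > (N : Int) ∧ ab.2 > (N : Int) then st
          else
            let a := if ab.1 > (N : Int) then ab.2 else ab.1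
            let b := if ab.2 > (N : Int) then a else ab.2
            ufUnion st a b) stA)
      (l.foldl (fun st ab =>
          if ab.1 > (N : Int) ∧ ab.2 > (N : Int) then st
          else
            let a := if ab.1 > (N : Int) then ab.2 else ab.1
            let b := if ab.2 > (N : Int) then a else ab.2
            let c1 := pvGet st.1 a
            let c2 := pvGet st.1 b
            if c1 = c2 then (st.1, pvSet st.2.1 c1 1, st.2.2)
            else (relabel (PySem.List.pyRange 0 ((N : Int) + 1) 1) c1 c2 st.1,
                  pvSet st.2.1 c2 (PySem.Int.bor (pvGet st.2.1 c2) (pvGet st.2.1 c1)),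
                  pvSet st.2.2 c2 (max (pvGet st.2.2 c1) (pvGet st.2.2 c2)))) stB) := by
  exact foldl_rel (StInv N) (fun x => -((N : Int) + 1) ≤ x.1 ∧ -((N : Int) + 1) ≤ x.2) _ _
    (fun x a b hq hp => step_inv N x a b hq hp) l stA stB hl h0

theorem final_eq (N : Nat)
    (stA stB : List Int × List Int × List Int)
    (hinv : StInv N stA stB) :
    ((PySem.List.pyRange 1 ((N : Int) + 1) 1).foldl (fun (acc : List Int × Int) i =>
        let fr := ufFind acc.1.length acc.1 i
        if pvGet stA.2.1 fr.2 ≠ 0 then (fr.1, acc.2)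
        else (fr.1, min acc.2 (pvGet stA.2.2 fr.2))) (stA.1, (N : Int) + 1)).2 =
    (PySem.List.pyRange 1 ((N : Int) + 1) 1).foldl (fun result i =>
        let c := pvGet stB.1 i
        if pvGet stB.2.1 c = 0 then min result (pvGet stB.2.2 c) else result) ((N : Int) + 1) := by
  obtain ⟨hwf, hclen, hmlen, hdclen, hdcirlen, hdmxlen, hptw⟩ := hinv
  have hrel := foldl_rel
    (fun (acc : List Int × Int) (res : Int) =>
      WFp N acc.1 ∧ (∀ u, inR N u → rootp N acc.1 u = rootp N stA.1 u) ∧ acc.2 = res)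
    (fun i : Int => 1 ≤ i ∧ i ≤ (N : Int))
    (fun (acc : List Int × Int) i =>
        let fr := ufFind acc.1.length acc.1 i
        if pvGet stA.2.1 fr.2 ≠ 0 then (fr.1, acc.2)
        else (fr.1, min acc.2 (pvGet stA.2.2 fr.2)))
    (fun result i =>
        let c := pvGet stB.1 i
        if pvGet stB.2.1 c = 0 then min result (pvGet stB.2.2 c) else result)
    ?_ (PySem.List.pyRange 1 ((N : Int) + 1) 1) (stA.1, (N : Int) + 1) ((N : Int) + 1)
    ?_ ⟨hwf, fun u _ => rfl, rfl⟩
  · exact hrel.2.2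
  · intro i acc res hq hp
    obtain ⟨hwfa, hpres, hres⟩ := hp
    have hiin : inR N i := ⟨by omega, hq.2⟩
    obtain ⟨k, hk, hroot⟩ := wf_reach_root N acc.1 hwfa i hiin
    have hlen : acc.1.length = N + 1 := hwfa.1
    have hfs := find_spec N acc.1.length acc.1 i hwfa hiin ⟨k, by omega, hroot⟩
    obtain ⟨hval, hwf', hpres'⟩ := hfs
    have hci : pvGet stB.1 i = rootp N stA.1 i := (hptw i hiin).1
    have hri : rootp N acc.1 i = rootp N stA.1 i := hpres i hiin
    have hrin : inR N (rootp N stA.1 i) := by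
      rw [← hri]
      exact rootp_inR N acc.1 hwfa i hiin
    have hcir : pvGet stB.2.1 (rootp N stA.1 i) = pvGet stA.2.1 (rootp N stA.1 i) :=
      (hptw _ hrin).2.1
    have hmx : pvGet stB.2.2 (rootp N stA.1 i) = pvGet stA.2.2 (rootp N stA.1 i) :=
      (hptw _ hrin).2.2
    have hval' : (ufFind acc.1.length acc.1 i).2 = rootp N stA.1 i := by rw [hval, hri]
    dsimp only
    rw [hval', hci, hcir, hmx]
    by_cases hz : pvGet stA.2.1 (rootp N stA.1 i) = 0
    · rw [if_neg (by simpa using hz), if_pos hz]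
      exact ⟨hwf', fun u hu => by rw [hpres' u hu, hpres u hu], by rw [hres]⟩
    · rw [if_pos (by simpa using hz), if_neg hz]
      exact ⟨hwf', fun u hu => by rw [hpres' u hu, hpres u hu], hres⟩
  · intro x hx
    rw [PySem.List.mem_pyRange_one] at hx
    exact ⟨hx.1, by omega⟩

-- ===== VERDICT (by name: the statement is the Claim_ definition above) =====
theorem solution_spec : Claim_equal_solution := by
  intro A B _ hpre
  unfold Spec_solution
  have h0 := init_inv A.length
  have h1 := edges_inv A.length (A.zip B) hpre _ _ h0
  exact final_eq A.length _ _ h1
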